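-- pv_equiv track=rewrite | github.com/robertmassman/chiral-geometrogenesis-supplementary | verification/Phase5/theorem_5_2_2_lattice_coherence.py | generate_fcc_lattice
-- ===== SOURCE A (Python) =====
-- from typing import List, Tuple
--
-- def is_fcc_point(n1: int, n2: int, n3: int) -> bool:
--     """
--     Check if (n1, n2, n3) is a valid FCC lattice point.
--
--     FCC condition: n1 + n2 + n3 ≡ 0 (mod 2)
--
--     This is a COMBINATORIAL constraint, not a metric one.
--     The lattice exists as a discrete set of vertices with:
--     - Adjacency relations (which vertices are neighbors)
--     - Graph distance (minimum edge path length)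
--     - NO physical distances (no metric required)
--     """
--     return (n1 + n2 + n3) % 2 == 0
--
-- def generate_fcc_lattice(N: int) -> List[Tuple[int, int, int]]:
--     """
--     Generate all FCC lattice points within [-N, N]³.
--
--     Returns list of (n1, n2, n3) tuples satisfying the FCC condition.
--     """
--     points = []
--     for n1 in range(-N, N+1):
--         for n2 in range(-N, N+1):
--             for n3 in range(-N, N+1):
--                 if is_fcc_point(n1, n2, n3):
--                     points.append((n1, n2, n3))
--     return points
-- ===== SOURCE B (Python) =====
-- def generate_fcc_lattice(N):
--     """Generate all FCC lattice points (even coordinate sum) in [-N,N]^3.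
--
--     Precompute the two possible n3 sequences (even-parity and odd-parity
--     values in [-N, N]) once; for each (n1, n2) pick the one whose parity
--     matches n1+n2, so no candidate point is ever tested or rejected.
--     """
--     n3s = (list(range(-N, N + 1, 2)), list(range(-N + 1, N + 1, 2)))
--     return [(n1, n2, n3)
--             for n1 in range(-N, N + 1)
--             for n2 in range(-N, N + 1)
--             for n3 in n3s[(n1 + n2 + N) % 2]]
-- ===== Notes on version B (the rewrite author's own statement) =====
-- stated objective: alternative
-- what changed: B precomputes the two parity-matching n3 sequences once and directly emits only the even-sum points via a comprehension, instead of enumerating all (2N+1)^3 triples and filtering each through a helper call.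
import Mathlib
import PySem

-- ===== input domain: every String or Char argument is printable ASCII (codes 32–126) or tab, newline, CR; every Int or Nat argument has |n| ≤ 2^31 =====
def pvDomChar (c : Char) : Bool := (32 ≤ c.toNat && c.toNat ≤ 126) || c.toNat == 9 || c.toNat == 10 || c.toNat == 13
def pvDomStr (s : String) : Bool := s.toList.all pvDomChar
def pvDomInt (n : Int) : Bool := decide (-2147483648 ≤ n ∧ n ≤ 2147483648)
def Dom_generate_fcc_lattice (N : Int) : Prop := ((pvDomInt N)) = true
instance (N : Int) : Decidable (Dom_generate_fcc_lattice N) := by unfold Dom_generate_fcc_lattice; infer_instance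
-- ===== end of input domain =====

-- B precomputes the two parity-matching n3 sequences and emits only the even-sum
-- points via a comprehension, with no per-point parity test (alternative algorithm).


-- ===== PORT A =====
def is_fcc_point (n1 n2 n3 : Int) : Bool := PySem.Int.mod (n1 + n2 + n3) 2 == 0

def generate_fcc_lattice (N : Int) : List (Int × Int × Int) :=
  (PySem.List.pyRange (-N) (N + 1) 1).foldl (fun pts n1 =>
    (PySem.List.pyRange (-N) (N + 1) 1).foldl (fun pts n2 =>
      (PySem.List.pyRange (-N) (N + 1) 1).foldl (fun pts n3 =>
        if is_fcc_point n1 n2 n3 then pts ++ [(n1, n2, n3)] else pts) pts) pts) []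

-- ===== PORT B =====
def generate_fcc_lattice_alt (N : Int) : List (Int × Int × Int) :=
  let n3s := (PySem.List.pyRange (-N) (N + 1) 2, PySem.List.pyRange (-N + 1) (N + 1) 2)
  (PySem.List.pyRange (-N) (N + 1) 1).flatMap (fun n1 =>
    (PySem.List.pyRange (-N) (N + 1) 1).flatMap (fun n2 =>
      -- n3s[(n1+n2+N) % 2]: the index is 0 or 1 since the divisor 2 is positive
      (if PySem.Int.mod (n1 + n2 + N) 2 == 0 then n3s.1 else n3s.2).map (fun n3 => (n1, n2, n3))))

-- ===== PRECONDITION & SPEC =====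
def Spec_generate_fcc_lattice (N : Int) (out : List (Int × Int × Int)) : Prop := out = generate_fcc_lattice_alt N
instance (N : Int) (out : List (Int × Int × Int)) : Decidable (Spec_generate_fcc_lattice N out) := by unfold Spec_generate_fcc_lattice; infer_instance

-- ===== CLAIM (what is proved, stated in full; the proofs are below) =====
def Claim_equal_generate_fcc_lattice : Prop := ∀ (N : Int), Dom_generate_fcc_lattice N → Spec_generate_fcc_lattice N (generate_fcc_lattice N)

-- ===== LEMMAS AND PROOFS =====

lemma mod_two_emod (x : Int) : PySem.Int.mod x 2 = x % 2 :=
  PySem.Int.mod_eq_emod_of_pos (by norm_num)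

lemma pyRange_two_nil {a b : Int} (h : b ≤ a) : PySem.List.pyRange a b 2 = [] := by
  rw [PySem.List.pyRange_of_pos _ _ (by norm_num : (0:Int) < 2), if_neg (by omega)]
  simp

lemma pyRange_two_cons {a b : Int} (h : a < b) :
    PySem.List.pyRange a b 2 = a :: PySem.List.pyRange (a + 2) b 2 := by
  rw [PySem.List.pyRange_of_pos _ _ (by norm_num : (0:Int) < 2),
      PySem.List.pyRange_of_pos _ _ (by norm_num : (0:Int) < 2), if_pos h]
  by_cases h2 : a + 2 < b
  · rw [if_pos h2]
    have hc : ((b - a + 2 - 1) / 2).toNat = ((b - (a + 2) + 2 - 1) / 2).toNat + 1 := by omega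
    rw [hc, List.range_succ_eq_map]
    simp only [List.map_cons, List.map_map]
    congr 1
    · norm_num
    refine List.map_congr_left ?_
    intro k _
    simp only [Function.comp_apply]
    push_cast
    ring
  · rw [if_neg h2]
    have hc : ((b - a + 2 - 1) / 2).toNat = 1 := by omega
    simp [hc, List.range_succ]

lemma filter_parity (c : Int) : ∀ (k : Nat) (a b : Int), (b - a).toNat = k →
    (PySem.List.pyRange a b 1).filter (fun n => PySem.Int.mod (c + n) 2 == 0)
      = PySem.List.pyRange (a + PySem.Int.mod (c + a) 2) b 2 := by
  intro k
  induction k with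
  | zero =>
    intro a b hk
    have hba : b ≤ a := by omega
    rw [PySem.List.pyRange_one_eq_nil hba, List.filter_nil]
    have hm : 0 ≤ PySem.Int.mod (c + a) 2 := by rw [mod_two_emod]; omega
    exact (pyRange_two_nil (by omega)).symm
  | succ k ih =>
    intro a b hk
    have hab : a < b := by omega
    rw [PySem.List.pyRange_one_cons hab, List.filter_cons]
    have hmod := mod_two_emod (c + a)
    have hmod1 := mod_two_emod (c + (a + 1))
    rcases Int.emod_two_eq (c + a) with h0 | h1
    · have hkeep : (PySem.Int.mod (c + a) 2 == 0) = true := by rw [hmod, h0]; rfl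
      rw [if_pos hkeep, ih (a + 1) b (by omega)]
      have hs : (a + 1) + PySem.Int.mod (c + (a + 1)) 2 = a + 2 := by
        rw [hmod1]; omega
      rw [hs, hmod, h0, add_zero, pyRange_two_cons hab]
    · have hdrop : (PySem.Int.mod (c + a) 2 == 0) = false := by
        rw [hmod, h1]; rfl
      rw [if_neg (by simp [h1]), ih (a + 1) b (by omega)]
      have hs : (a + 1) + PySem.Int.mod (c + (a + 1)) 2 = a + 1 := by
        rw [hmod1]; omega
      rw [hs, hmod, h1]

lemma inner_filter_eq (N n1 n2 : Int) :
    ((PySem.List.pyRange (-N) (N + 1) 1).filter (fun n3 => is_fcc_point n1 n2 n3)).map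
        (fun n3 => (n1, n2, n3))
      = (if PySem.Int.mod (n1 + n2 + N) 2 == 0 then PySem.List.pyRange (-N) (N + 1) 2
          else PySem.List.pyRange (-N + 1) (N + 1) 2).map (fun n3 => (n1, n2, n3)) := by
  simp only [is_fcc_point]
  rw [filter_parity (n1 + n2) ((N + 1) - (-N)).toNat (-N) (N + 1) rfl]
  have hm : PySem.Int.mod (n1 + n2 + -N) 2 = PySem.Int.mod (n1 + n2 + N) 2 := by
    rw [mod_two_emod, mod_two_emod]; omega
  rw [hm]
  rw [mod_two_emod (n1 + n2 + N)]
  rcases Int.emod_two_eq (n1 + n2 + N) with h | h <;> rw [h] <;> norm_num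

-- ===== VERDICT (by name: the statement is the Claim_ definition above) =====
theorem generate_fcc_lattice_spec : Claim_equal_generate_fcc_lattice := by
  intro N _
  unfold Spec_generate_fcc_lattice generate_fcc_lattice generate_fcc_lattice_alt
  simp only [PySem.List.foldl_append_if, PySem.List.foldl_append_eq_flatMap, List.nil_append]
  refine List.flatMap_congr ?_
  intro n1 _
  refine List.flatMap_congr ?_
  intro n2 _
  exact inner_filter_eq N n1 n2
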